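-- pv_equiv track=rewrite | github.com/pypi-data/pypi-mirror-175 | packages/dg-query-analysis/dg_query_analysis-1.17.0.tar.gz/dg_query_analysis-1.17.0/dg_query_analysis/processor_cut_phrase/processor_cut_phrase.py | _get_longest_phrase
-- ===== SOURCE A (Python) =====
-- def _get_longest_phrase(phrase_list):
--     length = len(phrase_list)
--     phrases = []
--     for idx in range(length):
--         is_kept = True
--         for jdx in range(length):
--             if idx == jdx:
--                 continue
--             else:
--                 if phrase_list[idx] in phrase_list[jdx]:
--                     is_kept = False
--                     break
--         if is_kept:
--             phrases.append(phrase_list[idx])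
--     return phrases
-- ===== SOURCE B (Python) =====
-- def _get_longest_phrase(phrase_list):
--     # Count occurrences, then build the set of MAXIMAL phrases greedily:
--     # scan distinct phrases in decreasing length; a phrase contained in some
--     # other phrase is (by transitivity of substring) contained in an already
--     # accepted maximal phrase, so each phrase is tested only against the
--     # maximal set found so far, not against all other phrases.
--     counts = {}
--     for p in phrase_list:
--         counts[p] = counts.get(p, 0) + 1
--     maximal = []
--     for p in sorted(counts, key=len, reverse=True):
--         if not any(p in m for m in maximal):
--             maximal.append(p)
--     kept = set(maximal)
--     return [p for p in phrase_list if counts[p] == 1 and p in kept]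
-- ===== Notes on version B (the rewrite author's own statement) =====
-- stated objective: alternative
-- what changed: Replaces A's all-pairs index scan by a different algorithm: count duplicates once, sort the distinct phrases by decreasing length and greedily build the maximal-phrase antichain, testing each phrase only against the maximal phrases accepted so far (correct by transitivity of the substring relation); output filters the original list against that set.
import Mathlib
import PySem

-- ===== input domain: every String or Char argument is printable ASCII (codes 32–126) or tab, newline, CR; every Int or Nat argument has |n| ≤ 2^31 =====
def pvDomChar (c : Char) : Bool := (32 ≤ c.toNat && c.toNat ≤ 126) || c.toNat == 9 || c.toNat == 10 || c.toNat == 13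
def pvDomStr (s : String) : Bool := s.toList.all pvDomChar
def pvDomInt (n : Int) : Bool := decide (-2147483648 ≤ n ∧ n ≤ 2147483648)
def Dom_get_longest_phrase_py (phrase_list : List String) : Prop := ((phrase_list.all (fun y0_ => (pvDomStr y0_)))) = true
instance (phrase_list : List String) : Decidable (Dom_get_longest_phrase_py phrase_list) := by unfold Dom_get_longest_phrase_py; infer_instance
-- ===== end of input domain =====

-- B replaces A's all-pairs scan by a different algorithm: count duplicates once, sort the
-- distinct phrases by decreasing length and greedily build the maximal-phrase antichain,
-- testing each phrase only against the maximal phrases accepted so far (sound by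
-- transitivity of the substring relation); objective: alternative.

-- ===== PORT A =====
-- inner 'for jdx in range(length)' loop with its break; the jdx list is the remaining range.
-- indices produced by range are always in bounds, so pyGetD with default "" is exact here.
def pvInnerA (phrase_list : List String) (idx : Int) : List Int → Bool
  | [] => true
  | jdx :: rest =>
    if idx = jdx then pvInnerA phrase_list idx rest
    else if PySem.Str.isIn (PySem.List.pyGetD phrase_list idx "")
              (PySem.List.pyGetD phrase_list jdx "") then false
    else pvInnerA phrase_list idx rest

def get_longest_phrase_py (phrase_list : List String) : List String :=
  let length : Int := phrase_list.length
  (PySem.List.pyRange 0 length 1).foldl (fun phrases idx =>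
    let is_kept := pvInnerA phrase_list idx (PySem.List.pyRange 0 length 1)
    if is_kept then phrases ++ [PySem.List.pyGetD phrase_list idx ""] else phrases) []

-- ===== PORT B =====
-- body of B's 'for p in sorted(counts, key=len, reverse=True)' loop
def pvGreedyStep (maximal : List String) (p : String) : List String :=
  if maximal.any (fun m => PySem.Str.isIn p m) then maximal else maximal ++ [p]

def get_longest_phrase_py_alt (phrase_list : List String) : List String :=
  let counts := phrase_list.foldl (fun (d : PySem.Dict String Int) p => d.insert p (d.getD p 0 + 1)) PySem.Dict.empty
  let maximal := (PySem.List.sorted counts.keys PySem.Str.len true).foldl pvGreedyStep []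
  let kept := PySem.Set.ofList maximal
  phrase_list.filter (fun p => (counts.getD p 0 == 1) && PySem.Set.contains kept p)

-- ===== PRECONDITION & SPEC =====
def Spec_get_longest_phrase_py (phrase_list : List String) (out : List String) : Prop := out = get_longest_phrase_py_alt phrase_list
instance (phrase_list : List String) (out : List String) : Decidable (Spec_get_longest_phrase_py phrase_list out) := by unfold Spec_get_longest_phrase_py; infer_instance

-- ===== CLAIM (what is proved, stated in full; the proofs are below) =====
def Claim_equal_get_longest_phrase_py : Prop := ∀ (phrase_list : List String), Dom_get_longest_phrase_py phrase_list → Spec_get_longest_phrase_py phrase_list (get_longest_phrase_py phrase_list)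

-- ===== LEMMAS AND PROOFS =====

-- the value-level keep predicate both programs compute
def pvKeep (l : List String) (p : String) : Bool :=
  (l.count p == 1) && !(l.any (fun q => (q != p) && PySem.Str.isIn p q))

lemma pvInnerA_cons (l : List String) (idx jdx : Int) (rest : List Int) :
    pvInnerA l idx (jdx :: rest) =
      if idx = jdx then pvInnerA l idx rest
      else if PySem.Str.isIn (PySem.List.pyGetD l idx "") (PySem.List.pyGetD l jdx "") then false
      else pvInnerA l idx rest := rfl

lemma pvInnerA_iff (l : List String) (idx : Int) (js : List Int) :
    pvInnerA l idx js = true ↔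
      ∀ j ∈ js, j ≠ idx →
        PySem.Str.isIn (PySem.List.pyGetD l idx "") (PySem.List.pyGetD l j "") = false := by
  induction js with
  | nil =>
    constructor
    · intro _ j hj; exact absurd hj (List.not_mem_nil)
    · intro _; rfl
  | cons j rest ih =>
    rw [pvInnerA_cons]
    by_cases h : idx = j
    · rw [if_pos h, ih]
      constructor
      · rintro hall j' hj' hne
        rcases List.mem_cons.mp hj' with rfl | hj'
        · exact absurd h.symm hne
        · exact hall j' hj' hne
      · intro hall j' hj' hne
        exact hall j' (List.mem_cons_of_mem _ hj') hne
    · rw [if_neg h]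
      cases hin : PySem.Str.isIn (PySem.List.pyGetD l idx "") (PySem.List.pyGetD l j "") with
      | true =>
        rw [if_pos rfl]
        constructor
        · intro hfalse; exact absurd hfalse (by simp)
        · intro hall
          have hf := hall j (List.mem_cons_self) (fun e => h e.symm)
          rw [hf] at hin; exact absurd hin (by simp)
      | false =>
        rw [if_neg (by simp), ih]
        constructor
        · intro hall j' hj' hne
          rcases List.mem_cons.mp hj' with rfl | hj'
          · exact hin
          · exact hall j' hj' hne
        · intro hall j' hj' hne
          exact hall j' (List.mem_cons_of_mem _ hj') hne

lemma pv_count_one_iff {α : Type} [DecidableEq α] (l : List α) (i : Nat) (hi : i < l.length) :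
    l.count l[i] = 1 ↔ ∀ k, (hk : k < l.length) → k ≠ i → l[k] ≠ l[i] := by
  induction l generalizing i with
  | nil => simp at hi
  | cons a t ih =>
    cases i with
    | zero =>
      simp only [List.getElem_cons_zero]
      rw [List.count_cons_self]
      constructor
      · intro h k hk hne
        have ht : t.count a = 0 := by omega
        have hna : a ∉ t := by rwa [← List.count_eq_zero]
        cases k with
        | zero => exact absurd rfl hne
        | succ k' =>
          simp only [List.getElem_cons_succ]
          intro he; exact hna (he ▸ List.getElem_mem _)
      · intro h
        have hna : a ∉ t := by
          intro hmem
          obtain ⟨k, hk, he⟩ := List.mem_iff_getElem.mp hmem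
          exact h (k+1) (by simpa using hk) (by omega) (by simpa using he)
        rw [List.count_eq_zero.mpr hna]
    | succ j =>
      have hj : j < t.length := by simpa using hi
      simp only [List.getElem_cons_succ]
      by_cases ha : a = t[j]
      · subst ha
        rw [List.count_cons_self]
        constructor
        · intro h
          have hpos : 0 < t.count t[j] := List.count_pos_iff.mpr (List.getElem_mem _)
          omega
        · intro h
          exact absurd rfl (h 0 (by simp) (by omega))
      · have hb' : (a == t[j]) = false := beq_eq_false_iff_ne.mpr ha
        rw [List.count_cons]
        simp only [hb', if_false, Bool.false_eq_true, add_zero]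
        rw [ih j hj]
        constructor
        · intro h k hk hne
          cases k with
          | zero =>
            simp only [List.getElem_cons_zero]
            exact ha
          | succ k' =>
            simp only [List.getElem_cons_succ]
            exact h k' (by simpa using hk) (by omega)
        · intro h k hk hne
          exact h (k+1) (by simpa using hk) (by omega)

lemma pv_isIn_self (p : String) : PySem.Str.isIn p p = true := by
  rw [PySem.Str.isIn_iff_infix]

lemma pvKeep_iff (l : List String) (p : String) :
    pvKeep l p = true ↔
      l.count p = 1 ∧ ∀ q ∈ l, q ≠ p → PySem.Str.isIn p q = false := by
  unfold pvKeep
  rw [Bool.and_eq_true, beq_iff_eq, Bool.not_eq_true', List.any_eq_false]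
  constructor
  · rintro ⟨h1, h2⟩
    refine ⟨h1, fun q hq hne => ?_⟩
    have hf := h2 q hq
    have hf2 : ((q != p) && PySem.Str.isIn p q) = false := by
      cases hb : ((q != p) && PySem.Str.isIn p q) with
      | true => exact absurd hb hf
      | false => rfl
    rcases Bool.and_eq_false_iff.mp hf2 with hf' | hf'
    · exact absurd (by simpa using hf') hne
    · exact hf'
  · rintro ⟨h1, h2⟩
    refine ⟨h1, fun q hq => ?_⟩
    by_cases hne : q = p
    · subst hne; simp
    · rw [h2 q hq hne]; simp

-- the pointwise key lemma: A's inner loop decides pvKeep of the value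
lemma pvInnerA_eq_keep (l : List String) (idx : Int) (h0 : 0 ≤ idx) (hn : idx < (l.length : Int)) :
    pvInnerA l idx (PySem.List.pyRange 0 (l.length : Int) 1) =
      pvKeep l (PySem.List.pyGetD l idx "") := by
  have hi : idx.toNat < l.length := by omega
  have hidx : PySem.List.pyGetD l idx "" = l[idx.toNat] :=
    PySem.List.pyGetD_eq_getElem l "" h0 hn
  set p := l[idx.toNat] with hp
  have hiff : pvInnerA l idx (PySem.List.pyRange 0 (l.length : Int) 1) = true ↔
      pvKeep l p = true := by
    rw [pvInnerA_iff, pvKeep_iff]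
    constructor
    · intro hall
      have hptw : ∀ k, (hk : k < l.length) → k ≠ idx.toNat → PySem.Str.isIn p l[k] = false := by
        intro k hk hne
        have hmem : (k : Int) ∈ PySem.List.pyRange 0 (l.length : Int) 1 := by
          rw [PySem.List.mem_pyRange_one]; omega
        have h2 := hall (k : Int) hmem (by omega)
        rw [hidx] at h2
        rw [PySem.List.pyGetD_eq_getElem l "" (by omega) (by exact_mod_cast hk)] at h2
        simpa using h2
      have hc : l.count p = 1 := by
        rw [pv_count_one_iff l idx.toNat hi]
        intro k hk hne he
        have hf := hptw k hk hne
        rw [he, pv_isIn_self] at hf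
        exact absurd hf (by simp)
      refine ⟨hc, fun q hqm hne => ?_⟩
      obtain ⟨k, hk, he⟩ := List.mem_iff_getElem.mp hqm
      have hki : k ≠ idx.toNat := by
        intro e; subst e; exact hne (he.symm.trans hp.symm)
      rw [← he]; exact hptw k hk hki
    · rintro ⟨hc, hq⟩
      intro j hj hne
      rw [PySem.List.mem_pyRange_one] at hj
      have hjn : j.toNat < l.length := by omega
      rw [hidx, PySem.List.pyGetD_eq_getElem l "" hj.1 hj.2]
      have hkne : j.toNat ≠ idx.toNat := by omega
      by_cases he : l[j.toNat] = p
      · exact absurd he ((pv_count_one_iff l idx.toNat hi).mp hc j.toNat hjn hkne)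
      · exact hq l[j.toNat] (List.getElem_mem _) he
  rw [hidx]
  cases hA : pvInnerA l idx (PySem.List.pyRange 0 (l.length : Int) 1) <;>
    cases hB : pvKeep l p
  · rfl
  · exact absurd (hiff.mpr hB) (by rw [hA]; simp)
  · exact absurd (hiff.mp hA) (by rw [hB]; simp)
  · rfl

lemma pvA_eq_filter (l : List String) :
    get_longest_phrase_py l = l.filter (pvKeep l) := by
  unfold get_longest_phrase_py
  rw [PySem.List.foldl_append_if]
  have hcongr : List.filter (fun idx => pvInnerA l idx (PySem.List.pyRange 0 (l.length : Int) 1))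
        (PySem.List.pyRange 0 (l.length : Int) 1) =
      List.filter (fun idx => pvKeep l (PySem.List.pyGetD l idx ""))
        (PySem.List.pyRange 0 (l.length : Int) 1) :=
    List.filter_congr (fun idx hidx => by
      rw [PySem.List.mem_pyRange_one] at hidx
      exact pvInnerA_eq_keep l idx hidx.1 hidx.2)
  rw [List.nil_append, hcongr]
  have hm : List.map (fun j => PySem.List.pyGetD l j "") (PySem.List.pyRange 0 (l.length : Int) 1) = l := by
    have h := PySem.List.map_pyGetD_pyRange_zero l ""
    simpa using h
  have hfm := @List.filter_map Int String (fun j => PySem.List.pyGetD l j "") (pvKeep l)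
      (PySem.List.pyRange 0 (l.length : Int) 1)
  exact hfm.symm.trans (by rw [hm])

-- ===== B-side: the greedy maximal-antichain fold =====

-- the accumulator only grows
lemma pvGreedy_sub (S : List String) (M : List String) :
    ∀ x ∈ M, x ∈ S.foldl pvGreedyStep M := by
  induction S generalizing M with
  | nil => intro x hx; exact hx
  | cons a S' ih =>
    intro x hx
    simp only [List.foldl_cons]
    refine ih (pvGreedyStep M a) x ?_
    unfold pvGreedyStep
    split_ifs
    · exact hx
    · exact List.mem_append_left _ hx

-- every element of the result came from the accumulator or the processed list
lemma pvGreedy_mem_src (S : List String) (M : List String) :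
    ∀ x ∈ S.foldl pvGreedyStep M, x ∈ M ∨ x ∈ S := by
  induction S generalizing M with
  | nil => intro x hx; exact Or.inl hx
  | cons a S' ih =>
    intro x hx
    simp only [List.foldl_cons] at hx
    rcases ih (pvGreedyStep M a) x hx with h | h
    · unfold pvGreedyStep at h
      split_ifs at h
      · exact Or.inl h
      · rcases List.mem_append.mp h with h | h
        · exact Or.inl h
        · exact Or.inr (List.mem_cons.mpr (Or.inl (List.mem_singleton.mp h)))
    · exact Or.inr (List.mem_cons_of_mem _ h)

-- completeness: a phrase contained in no other distinct phrase is accepted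
lemma pvGreedy_complete (S : List String) (M : List String) (p : String)
    (hM : ∀ m ∈ M, ¬ p.toList <:+: m.toList)
    (hp : p ∈ S)
    (hmax : ∀ q ∈ S, q ≠ p → ¬ p.toList <:+: q.toList) :
    p ∈ S.foldl pvGreedyStep M := by
  induction S generalizing M with
  | nil => exact absurd hp (List.not_mem_nil)
  | cons a S' ih =>
    simp only [List.foldl_cons]
    by_cases ha : a = p
    · subst ha
      have htest : M.any (fun m => PySem.Str.isIn a m) = false := by
        rw [List.any_eq_false]
        exact fun m hm hin => hM m hm ((PySem.Str.isIn_iff_infix a m).mp hin)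
      have hstep : pvGreedyStep M a = M ++ [a] := by
        unfold pvGreedyStep; rw [htest]; simp
      rw [hstep]
      exact pvGreedy_sub S' _ a (List.mem_append_right _ (List.mem_singleton.mpr rfl))
    · have hp' : p ∈ S' := by
        rcases List.mem_cons.mp hp with h | h
        · exact absurd h.symm ha
        · exact h
      refine ih (pvGreedyStep M a) ?_ hp'
        (fun q hq hne => hmax q (List.mem_cons_of_mem _ hq) hne)
      intro m hm
      unfold pvGreedyStep at hm
      split_ifs at hm
      · exact hM m hm
      · rcases List.mem_append.mp hm with h | h
        · exact hM m h
        · rw [List.mem_singleton.mp h]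
          exact hmax a (List.mem_cons_self) ha

-- two strings, one an infix of the other and of equal length, are equal
lemma pv_infix_len_eq {p q : String} (h : p.toList <:+: q.toList)
    (hl : p.toList.length = q.toList.length) : p = q :=
  String.toList_inj.mp (h.sublist.eq_of_length hl)

-- soundness: a phrase contained in another distinct listed phrase is never accepted
lemma pvGreedy_sound (S : List String) (M : List String) (p q : String)
    (hnd : S.Nodup)
    (hdesc : S.Pairwise (fun a b => b.toList.length ≤ a.toList.length))
    (hp : p ∈ S) (hqp : q ≠ p) (hsub : p.toList <:+: q.toList)
    (hpM : p ∉ M)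
    (hq : (∃ r ∈ M, q.toList <:+: r.toList) ∨ q ∈ S) :
    p ∉ S.foldl pvGreedyStep M := by
  induction S generalizing M with
  | nil => exact absurd hp (List.not_mem_nil)
  | cons a S' ih =>
    simp only [List.foldl_cons]
    have hndS' : S'.Nodup := hnd.of_cons
    have haS' : a ∉ S' := (List.nodup_cons.mp hnd).1
    have hdesc' : S'.Pairwise (fun a b => b.toList.length ≤ a.toList.length) :=
      hdesc.of_cons
    have hlen_a : ∀ b ∈ S', b.toList.length ≤ a.toList.length :=
      fun b hb => (List.pairwise_cons.mp hdesc).1 b hb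
    by_cases hap : a = p
    · subst hap
      -- q must already be covered by M: q cannot sit in the (shorter) tail
      have hcov : ∃ r ∈ M, q.toList <:+: r.toList := by
        rcases hq with h | h
        · exact h
        · rcases List.mem_cons.mp h with h' | h'
          · exact absurd h' hqp
          · have h1 : q.toList.length ≤ a.toList.length := hlen_a q h'
            have h2 : a.toList.length ≤ q.toList.length := hsub.length_le
            exact absurd (pv_infix_len_eq hsub (by omega)).symm hqp
      obtain ⟨r, hrM, hqr⟩ := hcov
      have htest : M.any (fun m => PySem.Str.isIn a m) = true :=
        List.any_eq_true.mpr ⟨r, hrM, (PySem.Str.isIn_iff_infix a r).mpr (hsub.trans hqr)⟩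
      have hstep : pvGreedyStep M a = M := by unfold pvGreedyStep; rw [htest]; simp
      rw [hstep]
      intro hmem
      rcases pvGreedy_mem_src S' M a hmem with h | h
      · exact hpM h
      · exact haS' h
    · have hp' : p ∈ S' := by
        rcases List.mem_cons.mp hp with h | h
        · exact absurd h.symm hap
        · exact h
      refine ih (pvGreedyStep M a) hndS' hdesc' hp' ?_ ?_
      · -- p ∉ pvGreedyStep M a
        intro hmem
        unfold pvGreedyStep at hmem
        split_ifs at hmem
        · exact hpM hmem
        · rcases List.mem_append.mp hmem with h | h
          · exact hpM h
          · exact hap (List.mem_singleton.mp h).symm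
      · -- q covered by the new accumulator, or still ahead
        rcases hq with ⟨r, hrM, hqr⟩ | hqS
        · refine Or.inl ⟨r, ?_, hqr⟩
          unfold pvGreedyStep
          split_ifs
          · exact hrM
          · exact List.mem_append_left _ hrM
        · rcases List.mem_cons.mp hqS with rfl | hq'
          · by_cases htest : M.any (fun m => PySem.Str.isIn q m) = true
            · obtain ⟨m, hm, him⟩ := List.any_eq_true.mp htest
              refine Or.inl ⟨m, ?_, (PySem.Str.isIn_iff_infix q m).mp him⟩
              unfold pvGreedyStep
              rw [if_pos htest]
              exact hm
            · refine Or.inl ⟨q, ?_, List.infix_refl _⟩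
              unfold pvGreedyStep
              rw [if_neg htest]
              exact List.mem_append_right _ (List.mem_singleton.mpr rfl)
          · exact Or.inr hq'

-- characterisation of the greedy fold started from the empty accumulator
lemma pvGreedy_char (S : List String) (p : String)
    (hnd : S.Nodup)
    (hdesc : S.Pairwise (fun a b => b.toList.length ≤ a.toList.length))
    (hp : p ∈ S) :
    p ∈ S.foldl pvGreedyStep [] ↔ ∀ q ∈ S, q ≠ p → ¬ p.toList <:+: q.toList := by
  constructor
  · intro hmem q hq hne hinf
    exact pvGreedy_sound S [] p q hnd hdesc hp hne hinf (List.not_mem_nil) (Or.inr hq)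
      hmem
  · intro hmax
    exact pvGreedy_complete S [] p (fun m hm => absurd hm (List.not_mem_nil)) hp hmax

lemma pvB_eq_filter (l : List String) :
    get_longest_phrase_py_alt l = l.filter (pvKeep l) := by
  unfold get_longest_phrase_py_alt
  rw [PySem.Dict.foldl_insert_getD_add_one_eq_counter]
  apply List.filter_congr
  intro p hpl
  rw [PySem.Dict.getD_counter, PySem.Dict.keys_counter]
  -- the sorted distinct phrases
  set S := PySem.List.sorted (PySem.Set.ofList l) PySem.Str.len true with hS
  have hmemS : ∀ x : String, x ∈ S ↔ x ∈ l := by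
    intro x
    rw [hS, PySem.List.mem_sorted, PySem.Set.mem_ofList]
  have hnd : S.Nodup :=
    ((PySem.List.sorted_perm (PySem.Set.ofList l) PySem.Str.len true).nodup_iff).mpr
      (PySem.Set.nodup_ofList l)
  have hdesc : S.Pairwise (fun a b => b.toList.length ≤ a.toList.length) := by
    have h := PySem.List.sorted_pairwise_rev (PySem.Set.ofList l) PySem.Str.len
    rw [← hS] at h
    refine h.imp ?_
    intro a b hab
    have ha : PySem.Str.len a = (a.toList.length : Int) := by simp [pysem]
    have hb : PySem.Str.len b = (b.toList.length : Int) := by simp [pysem]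
    rw [ha, hb] at hab
    exact_mod_cast hab
  have hmax := pvGreedy_char S p hnd hdesc ((hmemS p).mpr hpl)
  -- turn set-membership of the greedy result into the pairwise condition of pvKeep
  have hcontains : PySem.Set.contains (PySem.Set.ofList (S.foldl pvGreedyStep [])) p =
      !(l.any (fun q => (q != p) && PySem.Str.isIn p q)) := by
    cases hc : PySem.Set.contains (PySem.Set.ofList (S.foldl pvGreedyStep [])) p with
    | true =>
      have hmem : p ∈ S.foldl pvGreedyStep [] := by
        have := (by simpa [PySem.Set.contains] using hc : p ∈ PySem.Set.ofList (S.foldl pvGreedyStep []))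
        exact (PySem.Set.mem_ofList _ p).mp this
      have hall := hmax.mp hmem
      symm
      simp only [Bool.not_eq_true']
      rw [List.any_eq_false]
      intro q hq
      simp only [Bool.and_eq_true, not_and, bne_iff_ne, ne_eq]
      intro hne hin
      exact hall q ((hmemS q).mpr hq) hne ((PySem.Str.isIn_iff_infix p q).mp hin)
    | false =>
      have hnmem : p ∉ S.foldl pvGreedyStep [] := by
        intro hmem
        have ht : PySem.Set.contains (PySem.Set.ofList (S.foldl pvGreedyStep [])) p = true := by
          simp only [PySem.Set.contains, List.contains_iff_mem]
          exact (PySem.Set.mem_ofList _ p).mpr hmem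
        rw [hc] at ht
        exact Bool.false_ne_true ht
      have := mt hmax.mpr hnmem
      push_neg at this
      obtain ⟨q, hqS, hne, hinf⟩ := this
      symm
      simp only [Bool.not_eq_false']
      exact List.any_eq_true.mpr ⟨q, (hmemS q).mp hqS,
        by simp only [Bool.and_eq_true, bne_iff_ne, ne_eq]
           exact ⟨hne, (PySem.Str.isIn_iff_infix p q).mpr hinf⟩⟩
  rw [hcontains]
  unfold pvKeep
  congr 1
  cases hc : l.count p == 1
  · rw [beq_eq_false_iff_ne] at hc
    have h2 : ((l.count p : Nat) : Int) ≠ 1 := by exact_mod_cast hc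
    exact beq_eq_false_iff_ne.mpr h2
  · rw [beq_iff_eq] at hc
    rw [hc]; decide

-- ===== VERDICT (by name: the statement is the Claim_ definition above) =====
theorem get_longest_phrase_py_spec : Claim_equal_get_longest_phrase_py := by
  intro l _
  unfold Spec_get_longest_phrase_py
  rw [pvA_eq_filter, pvB_eq_filter]
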